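-- pv_equiv track=rewrite | github.com/jianqiaomo/anno_1 | simulate/hardware_experiments/poly_analyzer.py | analyze_polynomial
-- ===== SOURCE A (Python) =====
-- def analyze_polynomial(poly_def):
--     """
--     Analyze a polynomial definition to extract:
--     1. Number of unique entries
--     2. Number of entries that are reused
--
--     Args:
--         poly_def: List of lists representing polynomial terms
--
--     Returns:
--         tuple: (unique_count, reused_count)
--     """
--     # Flatten all entries from all terms
--     all_entries = []
--     for term in poly_def:
--         all_entries.extend(term)
--
--     # Count occurrences of each entry
--     entry_counts = {}
--     for entry in all_entries:
--         entry_counts[entry] = entry_counts.get(entry, 0) + 1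
--
--     # Count unique entries (total distinct entries)
--     unique_count = len(entry_counts)
--
--     # Count reused entries (entries that appear more than once)
--     reused_count = sum(1 for count in entry_counts.values() if count > 1)
--
--     return unique_count, reused_count
-- ===== SOURCE B (Python) =====
-- def analyze_polynomial(poly_def):
--     seen = set()
--     reused = set()
--     for term in poly_def:
--         for entry in term:
--             if entry in seen:
--                 reused.add(entry)
--             else:
--                 seen.add(entry)
--     return len(seen), len(reused)
-- ===== Notes on version B (the rewrite author's own statement) =====
-- stated objective: simpler
-- what changed: Replaced flatten + frequency dict + filtered sum over counts by a single nested pass maintaining two sets (seen, reused) with a membership branch, returning their sizes.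
import Mathlib
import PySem

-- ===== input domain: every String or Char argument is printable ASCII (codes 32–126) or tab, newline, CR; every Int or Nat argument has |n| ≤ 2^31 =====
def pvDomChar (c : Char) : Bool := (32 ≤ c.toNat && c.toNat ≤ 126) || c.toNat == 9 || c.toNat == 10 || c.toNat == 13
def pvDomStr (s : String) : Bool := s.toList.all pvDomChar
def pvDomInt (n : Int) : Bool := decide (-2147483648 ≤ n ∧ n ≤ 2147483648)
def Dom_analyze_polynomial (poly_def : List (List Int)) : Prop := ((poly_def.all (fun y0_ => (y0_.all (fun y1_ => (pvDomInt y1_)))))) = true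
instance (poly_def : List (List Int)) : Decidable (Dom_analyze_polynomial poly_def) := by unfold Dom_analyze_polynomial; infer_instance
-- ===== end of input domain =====

-- B replaces A's flatten + frequency dict + filtered sum by one nested pass over the
-- terms maintaining two sets (seen, reused); same result, simpler decomposition.

-- ===== PORT A =====
def analyze_polynomial (poly_def : List (List Int)) : Int × Int :=
  -- all_entries = []; for term in poly_def: all_entries.extend(term)
  let all_entries : List Int := poly_def.foldl (fun acc term => acc ++ term) []
  -- entry_counts = {}; for entry in all_entries: entry_counts[entry] = entry_counts.get(entry, 0) + 1
  let entry_counts : PySem.Dict Int Int :=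
    all_entries.foldl (fun d entry => d.insert entry (d.getD entry 0 + 1)) PySem.Dict.empty
  -- unique_count = len(entry_counts)
  let unique_count : Int := (entry_counts.size : Int)
  -- reused_count = sum(1 for count in entry_counts.values() if count > 1)
  let reused_count : Int :=
    entry_counts.values.foldl (fun acc count => if 1 < count then acc + 1 else acc) 0
  (unique_count, reused_count)

-- ===== PORT B =====
def analyze_polynomial_alt (poly_def : List (List Int)) : Int × Int :=
  let st : PySem.Set Int × PySem.Set Int :=
    poly_def.foldl
      (fun st term =>
        term.foldl
          (fun (st : PySem.Set Int × PySem.Set Int) entry =>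
            if PySem.Set.contains st.1 entry then (st.1, PySem.Set.add st.2 entry)
            else (PySem.Set.add st.1 entry, st.2))
          st)
      (PySem.Set.empty, PySem.Set.empty)
  ((PySem.Set.len st.1 : Int), (PySem.Set.len st.2 : Int))

-- ===== PRECONDITION & SPEC =====
def Spec_analyze_polynomial (poly_def : List (List Int)) (out : Int × Int) : Prop := out = analyze_polynomial_alt poly_def
instance (poly_def : List (List Int)) (out : Int × Int) : Decidable (Spec_analyze_polynomial poly_def out) := by unfold Spec_analyze_polynomial; infer_instance

-- ===== CLAIM (what is proved, stated in full; the proofs are below) =====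
def Claim_equal_analyze_polynomial : Prop := ∀ (poly_def : List (List Int)), Dom_analyze_polynomial poly_def → Spec_analyze_polynomial poly_def (analyze_polynomial poly_def)

-- ===== LEMMAS AND PROOFS =====

-- A's hand-rolled extend loop builds the flatten.
theorem foldl_append_eq_flatten (L : List (List Int)) (acc : List Int) :
    L.foldl (fun acc term => acc ++ term) acc = acc ++ L.flatten := by
  induction L generalizing acc with
  | nil => simp
  | cons t ts ih => simp [List.foldl_cons, ih, List.flatten_cons]

def pvStep (st : PySem.Set Int × PySem.Set Int) (entry : Int) : PySem.Set Int × PySem.Set Int :=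
  if PySem.Set.contains st.1 entry then (st.1, PySem.Set.add st.2 entry)
  else (PySem.Set.add st.1 entry, st.2)

theorem pvStep_fst (st : PySem.Set Int × PySem.Set Int) (e : Int) :
    (pvStep st e).1 = PySem.Set.add st.1 e := by
  unfold pvStep
  by_cases h : PySem.Set.contains st.1 e
  · have h' : e ∈ st.1 := (PySem.Set.contains_iff _ _).mp h
    simp [PySem.Set.add, h']
  · have h' : e ∉ st.1 := fun hm => h ((PySem.Set.contains_iff _ _).mpr hm)
    simp [PySem.Set.add, h']

theorem pvFold_fst (l : List Int) (st : PySem.Set Int × PySem.Set Int) :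
    (l.foldl pvStep st).1 = PySem.Set.update st.1 l := by
  induction l generalizing st with
  | nil => rfl
  | cons a t ih => simp [List.foldl_cons, PySem.Set.update, ih, pvStep_fst]

theorem pvFold_snd_mem (l : List Int) (st : PySem.Set Int × PySem.Set Int) (x : Int) :
    x ∈ (l.foldl pvStep st).2 ↔ x ∈ st.2 ∨ (x ∈ l ∧ (x ∈ st.1 ∨ 2 ≤ l.count x)) := by
  induction l generalizing st with
  | nil => simp
  | cons a t ih =>
    rw [List.foldl_cons, ih]
    unfold pvStep
    by_cases ha : PySem.Set.contains st.1 a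
    · have ha' : a ∈ st.1 := (PySem.Set.contains_iff _ _).mp ha
      simp only [ha, if_pos]
      by_cases hx : x = a
      · subst hx
        simp [PySem.Set.mem_add, ha']
      · have hax : a ≠ x := fun h => hx h.symm
        simp [PySem.Set.mem_add, hx, hax, List.mem_cons]
    · have ha' : a ∉ st.1 := fun h => ha ((PySem.Set.contains_iff _ _).mpr h)
      simp only [ha, if_neg, Bool.false_eq_true, not_false_iff]
      by_cases hx : x = a
      · subst hx
        have hc : List.count x (x :: t) = List.count x t + 1 := by simp
        rw [hc]
        constructor
        · rintro (h | ⟨h1, _⟩)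
          · exact Or.inl h
          · have hp : 0 < List.count x t := List.count_pos_iff.mpr h1
            exact Or.inr ⟨List.mem_cons_self, Or.inr (by omega)⟩
        · rintro (h | ⟨_, (h2 | h2)⟩)
          · exact Or.inl h
          · exact absurd h2 ha'
          · have h1t : x ∈ t := List.count_pos_iff.mp (by omega)
            exact Or.inr ⟨h1t, Or.inl (by simp [PySem.Set.mem_add])⟩
      · have hax : a ≠ x := fun h => hx h.symm
        simp [PySem.Set.mem_add, hx, hax, List.mem_cons]

theorem pvFold_snd_nodup (l : List Int) (st : PySem.Set Int × PySem.Set Int)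
    (h : st.2.Nodup) : (l.foldl pvStep st).2.Nodup := by
  induction l generalizing st with
  | nil => exact h
  | cons a t ih =>
    rw [List.foldl_cons]
    apply ih
    unfold pvStep
    by_cases ha : PySem.Set.contains st.1 a
    · simp only [ha, if_pos]
      exact PySem.Set.nodup_add st.2 a h
    · simp only [ha, if_neg, Bool.false_eq_true, not_false_iff]
      exact h

-- A's reused loop counts the values exceeding 1.
theorem foldl_count_gt (l : List Int) (n : Int) :
    l.foldl (fun acc count => if 1 < count then acc + 1 else acc) n
      = n + ((l.filter (fun c => 1 < c)).length : Int) := by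
  induction l generalizing n with
  | nil => simp
  | cons a t ih =>
    by_cases h : (1 : Int) < a
    · simp [List.foldl_cons, ih, h]
      omega
    · simp [List.foldl_cons, ih, h]

theorem nodup_same_mem_length (l₁ l₂ : List Int) (h₁ : l₁.Nodup) (h₂ : l₂.Nodup)
    (h : ∀ x, x ∈ l₁ ↔ x ∈ l₂) : l₁.length = l₂.length :=
  List.Perm.length_eq (List.perm_of_nodup_nodup_toFinset_eq h₁ h₂
    (Finset.ext fun x => by simp [List.mem_toFinset, h x]))

-- ===== VERDICT (by name: the statement is the Claim_ definition above) =====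
theorem analyze_polynomial_spec : Claim_equal_analyze_polynomial := by
  intro poly_def _
  simp only [Spec_analyze_polynomial, analyze_polynomial, analyze_polynomial_alt]
  have hstep : (fun (st : PySem.Set Int × PySem.Set Int) (entry : Int) =>
      if PySem.Set.contains st.1 entry then (st.1, PySem.Set.add st.2 entry)
      else (PySem.Set.add st.1 entry, st.2)) = pvStep := rfl
  rw [hstep, foldl_append_eq_flatten, List.nil_append,
      PySem.Dict.foldl_insert_getD_add_one_eq_counter, ← List.foldl_flatten]
  rw [Prod.mk.injEq]
  set all := poly_def.flatten with hall
  constructor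
  -- unique counts
  · have hkeys : (PySem.Dict.counter all).keys = PySem.Set.ofList all :=
      PySem.Dict.keys_counter all
    have hseen : (all.foldl pvStep (PySem.Set.empty, PySem.Set.empty)).1
        = PySem.Set.ofList all := by
      rw [pvFold_fst]
      simp [PySem.Set.update, PySem.Set.ofList_eq_foldl, PySem.Set.empty]
    rw [hseen]
    have hsz : (PySem.Dict.counter all).size = (PySem.Dict.counter all).keys.length := by
      simp [PySem.Dict.size, PySem.Dict.keys]
    rw [hsz, hkeys]
    rfl
  -- reused counts
  · rw [foldl_count_gt]
    have hvals : (PySem.Dict.counter all).values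
        = (PySem.Set.ofList all).map (fun k => (all.count k : Int)) := by
      have hit := PySem.Dict.items_counter (xs := all)
      calc (PySem.Dict.counter all).values
          = (PySem.Dict.counter all).items.map (·.2) := by simp [PySem.Dict.values]
        _ = ((PySem.Set.ofList all).map (fun k => (k, (all.count k : Int)))).map (·.2) := by
              rw [hit]
        _ = (PySem.Set.ofList all).map (fun k => (all.count k : Int)) := by
              simp [List.map_map, Function.comp]
    rw [hvals, List.filter_map]
    set R := (all.foldl pvStep (PySem.Set.empty, PySem.Set.empty)).2 with hR
    have hRnodup : R.Nodup := pvFold_snd_nodup all _ (by simp [PySem.Set.empty])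
    have hRmem : ∀ x, x ∈ R ↔ x ∈ all ∧ 2 ≤ all.count x := by
      intro x
      rw [hR, pvFold_snd_mem]
      simp [PySem.Set.empty]
    have hLnodup : ((PySem.Set.ofList all).filter
        (fun k => (1 : Int) < (all.count k : Int))).Nodup :=
      (PySem.Set.nodup_ofList all).filter _
    have hlen : ((PySem.Set.ofList all).filter
        (fun k => (1 : Int) < (all.count k : Int))).length = R.length := by
      apply nodup_same_mem_length _ _ hLnodup hRnodup
      intro x
      rw [hRmem, List.mem_filter]
      have hmo : x ∈ PySem.Set.ofList all ↔ x ∈ all := by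
        simp [PySem.Set.mem_ofList]
      constructor
      · rintro ⟨h1, h2⟩
        refine ⟨hmo.mp h1, ?_⟩
        have := of_decide_eq_true h2
        exact_mod_cast this
      · rintro ⟨h1, h2⟩
        refine ⟨hmo.mpr h1, decide_eq_true ?_⟩
        exact_mod_cast h2
    simp only [Function.comp_def]
    rw [List.length_map, hlen]
    show (0 : Int) + (R.length : Int) = (PySem.Set.len R : Int)
    simp [PySem.Set.len]
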